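-- pv_equiv track=rewrite | github.com/turbomam/cmm-ai-automation | src/cmm_ai_automation/scripts/codify_strains.py | prioritize_synonyms
-- ===== SOURCE A (Python) =====
-- def prioritize_synonyms(synonyms: list[str]) -> list[str]:
--     """Prioritize synonyms for better matching.
--
--     Prefers names starting with "Methylobacterium" (canonical old name)
--     over newer names like "Methylorubrum" since OLS embeddings often
--     use the older names.
--     """
--     # Separate into preferred (old names) and others
--     preferred = []
--     others = []
--     for syn in synonyms:
--         # Skip very long entries (likely descriptions) or single words
--         if len(syn) > 100 or " " not in syn:
--             continue
--         # Prefer Methylobacterium over Methylorubrum for bacterial names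
--         if syn.startswith("Methylobacterium"):
--             preferred.append(syn)
--         else:
--             others.append(syn)
--     return preferred + others
-- ===== SOURCE B (Python) =====
-- def prioritize_synonyms(synonyms: list[str]) -> list[str]:
--     valid = [s for s in synonyms if len(s) <= 100 and " " in s]
--     return sorted(valid, key=lambda s: not s.startswith("Methylobacterium"))
-- ===== Notes on version B (the rewrite author's own statement) =====
-- stated objective: idiomatic
-- what changed: Replaces the manual two-accumulator partition loop with a filter comprehension followed by a stable sort on a boolean key (not startswith), relying on sort stability to preserve per-group order.
import Mathlib
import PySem

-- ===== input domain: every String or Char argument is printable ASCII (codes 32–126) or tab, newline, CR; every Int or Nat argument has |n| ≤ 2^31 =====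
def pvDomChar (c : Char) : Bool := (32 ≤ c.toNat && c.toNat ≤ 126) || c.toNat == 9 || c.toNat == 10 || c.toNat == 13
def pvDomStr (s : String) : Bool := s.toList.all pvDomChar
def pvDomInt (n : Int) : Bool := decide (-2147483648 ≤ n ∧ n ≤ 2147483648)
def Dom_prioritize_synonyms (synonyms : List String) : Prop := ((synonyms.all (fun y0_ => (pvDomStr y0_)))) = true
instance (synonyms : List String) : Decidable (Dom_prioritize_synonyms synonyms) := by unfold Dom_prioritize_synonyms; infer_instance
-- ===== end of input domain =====

-- B replaces A's manual two-accumulator partition loop by filter-then-stable-sort on a boolean key (idiomatic; same result, proved equal).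


-- ===== PORT A =====
def prioritize_synonyms (synonyms : List String) : List String :=
  let r := synonyms.foldl (fun (acc : List String × List String) syn =>
    if PySem.Str.len syn > 100 || !PySem.Str.isIn " " syn then acc
    else if PySem.Str.startswith syn "Methylobacterium" then (acc.1 ++ [syn], acc.2)
    else (acc.1, acc.2 ++ [syn])) ([], [])
  r.1 ++ r.2

-- ===== PORT B =====
def pvValidB (s : String) : Bool := PySem.Str.len s ≤ 100 && PySem.Str.isIn " " s

-- key = not s.startswith("Methylobacterium"): False (0) sorts before True (1)
def pvKeyB (s : String) : Nat := if PySem.Str.startswith s "Methylobacterium" then 0 else 1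

def prioritize_synonyms_alt (synonyms : List String) : List String :=
  PySem.List.sorted (synonyms.filter pvValidB) pvKeyB false

-- ===== PRECONDITION & SPEC =====
def Spec_prioritize_synonyms (synonyms : List String) (out : List String) : Prop := out = prioritize_synonyms_alt synonyms
instance (synonyms : List String) (out : List String) : Decidable (Spec_prioritize_synonyms synonyms out) := by unfold Spec_prioritize_synonyms; infer_instance

-- ===== CLAIM (what is proved, stated in full; the proofs are below) =====
def Claim_equal_prioritize_synonyms : Prop := ∀ (synonyms : List String), Dom_prioritize_synonyms synonyms → Spec_prioritize_synonyms synonyms (prioritize_synonyms synonyms)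

-- ===== LEMMAS AND PROOFS =====

def pvPref (s : String) : Bool := PySem.Str.startswith s "Methylobacterium"

theorem pvSkipFalse (x : String) (hv : pvValidB x = true) :
    (decide (PySem.Str.len x > 100) || !PySem.Str.isIn " " x) = false := by
  unfold pvValidB at hv
  simp at hv ⊢
  exact ⟨by omega, hv.2⟩

theorem pvSkipTrue (x : String) (hv : ¬ pvValidB x = true) :
    (decide (PySem.Str.len x > 100) || !PySem.Str.isIn " " x) = true := by
  unfold pvValidB at hv
  simp at hv ⊢
  by_cases h : 100 < x.length
  · exact Or.inl h
  · exact Or.inr (hv (by omega))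

-- Inserting x between a key-0 block and a key-1 block
theorem pvInsertBy_split (x : String) (a0 a1 : List String)
    (h0 : ∀ y ∈ a0, (decide (pvKeyB x < pvKeyB y)) = false)
    (h1 : ∀ y ∈ a1, (decide (pvKeyB x < pvKeyB y)) = true) :
    PySem.List.insertBy (fun a b => decide (pvKeyB a < pvKeyB b)) x (a0 ++ a1) = a0 ++ x :: a1 := by
  induction a0 with
  | nil =>
    cases a1 with
    | nil => rfl
    | cons h t => simp [PySem.List.insertBy, h1 h (by simp)]
  | cons y ys ih =>
    simp [PySem.List.insertBy, h0 y (by simp), ih (fun z hz => h0 z (by simp [hz]))]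

theorem pvFoldInsert (l : List String) : ∀ (a0 a1 : List String),
    (∀ y ∈ a0, pvKeyB y = 0) → (∀ y ∈ a1, pvKeyB y = 1) →
    l.foldl (fun acc x => PySem.List.insertBy (fun a b => decide (pvKeyB a < pvKeyB b)) x acc) (a0 ++ a1)
      = (a0 ++ l.filter (fun s => pvKeyB s == 0)) ++ (a1 ++ l.filter (fun s => pvKeyB s != 0)) := by
  induction l with
  | nil => intro a0 a1 _ _; simp
  | cons x t ih =>
    intro a0 a1 h0 h1
    simp only [List.foldl_cons]
    by_cases hx : pvKeyB x = 0
    · rw [pvInsertBy_split x a0 a1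
        (fun y hy => by simp [hx, h0 y hy])
        (fun y hy => by simp [hx, h1 y hy]),
        show a0 ++ x :: a1 = (a0 ++ [x]) ++ a1 by simp]
      rw [ih (a0 ++ [x]) a1
        (fun y hy => by rcases List.mem_append.1 hy with h | h; exact h0 y h; simp at h; simp [h, hx])
        h1]
      simp [hx]
    · have hx1 : pvKeyB x = 1 := by unfold pvKeyB at *; split_ifs at * <;> simp_all
      rw [show a0 ++ a1 = (a0 ++ a1) ++ ([] : List String) by simp,
        pvInsertBy_split x (a0 ++ a1) []
          (fun y hy => by
            rcases List.mem_append.1 hy with h | h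
            · simp [hx1, h0 y h]
            · simp [hx1, h1 y h])
          (fun y hy => by simp at hy)]
      rw [show (a0 ++ a1) ++ x :: [] = a0 ++ (a1 ++ [x]) by simp]
      rw [ih a0 (a1 ++ [x]) h0
        (fun y hy => by rcases List.mem_append.1 hy with h | h; exact h1 y h; simp at h; simp [h, hx1])]
      simp [hx1]

theorem pvSorted_partition (l : List String) :
    PySem.List.sorted l pvKeyB false
      = l.filter (fun s => pvKeyB s == 0) ++ l.filter (fun s => pvKeyB s != 0) := by
  rw [PySem.List.sorted_eq_foldl_insertBy]
  have := pvFoldInsert l [] [] (by simp) (by simp)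
  simpa using this

theorem pvFoldA (l : List String) : ∀ (p o : List String),
    l.foldl (fun (acc : List String × List String) syn =>
      if PySem.Str.len syn > 100 || !PySem.Str.isIn " " syn then acc
      else if PySem.Str.startswith syn "Methylobacterium" then (acc.1 ++ [syn], acc.2)
      else (acc.1, acc.2 ++ [syn])) (p, o)
    = (p ++ (l.filter pvValidB).filter pvPref, o ++ (l.filter pvValidB).filter (fun s => !pvPref s)) := by
  induction l with
  | nil => intro p o; simp
  | cons x t ih =>
    intro p o
    simp only [List.foldl_cons]
    by_cases hv : pvValidB x = true
    · rw [if_neg (by rw [pvSkipFalse x hv]; simp)]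
      by_cases hp : PySem.Str.startswith x "Methylobacterium" = true
      · rw [if_pos hp, ih]
        simp at hp
        simp [hv, pvPref, hp]
      · rw [if_neg hp, ih]
        simp at hp
        simp [hv, pvPref, hp]
    · rw [if_pos (pvSkipTrue x hv), ih]
      simp [hv]

theorem pvFilterKey (l : List String) :
    l.filter (fun s => pvKeyB s == 0) = l.filter pvPref ∧
    l.filter (fun s => pvKeyB s != 0) = l.filter (fun s => !pvPref s) := by
  constructor <;> (apply List.filter_congr; intro x _; unfold pvKeyB pvPref; split_ifs <;> simp_all)

-- ===== VERDICT (by name: the statement is the Claim_ definition above) =====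
theorem prioritize_synonyms_spec : Claim_equal_prioritize_synonyms := by
  intro synonyms _
  unfold Spec_prioritize_synonyms prioritize_synonyms prioritize_synonyms_alt
  rw [pvSorted_partition, (pvFilterKey _).1, (pvFilterKey _).2, pvFoldA]
  simp
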